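-- pv_equiv track=rewrite | github.com/Highwind360/rusty_toolbin | monoalphabetic_substitution_cipher_tool.py | all_chars_are_unique_and_alphabetic
-- ===== SOURCE A (Python) =====
-- from string import ascii_uppercase, ascii_lowercase
--
-- def all_chars_are_unique_and_alphabetic(thing):
--     """Checks that parameter has only unique, alphabetic characters."""
--     alphabet = ascii_lowercase + ascii_uppercase
--
--     # Gets a list of all the unique elements of thing
--     thing2 = list(set(thing))
--     is_unique = len(thing) == len(thing2)
--
--     is_alphabetic = True
--     for element in thing:
--         is_alphabetic = is_alphabetic and alphabet.__contains__(element)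
--
--     return is_alphabetic and is_unique
-- ===== SOURCE B (Python) =====
-- from string import ascii_uppercase, ascii_lowercase
--
-- def all_chars_are_unique_and_alphabetic(thing):
--     """Checks that parameter has only unique, alphabetic characters."""
--     letters = ascii_lowercase + ascii_uppercase
--     seen = set()
--     for c in thing:
--         if c in seen or c not in letters:
--             return False
--         seen.add(c)
--     return True
-- ===== Notes on version B (the rewrite author's own statement) =====
-- stated objective: simpler
-- what changed: Replaces A's two separate passes (a len(set(thing))==len(thing) uniqueness check plus a full AND-fold alphabet-membership loop with no early exit) by one early-exit scan that tracks the characters already visited in an incrementally built set and returns False at the first duplicate or non-letter.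
import Mathlib
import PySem

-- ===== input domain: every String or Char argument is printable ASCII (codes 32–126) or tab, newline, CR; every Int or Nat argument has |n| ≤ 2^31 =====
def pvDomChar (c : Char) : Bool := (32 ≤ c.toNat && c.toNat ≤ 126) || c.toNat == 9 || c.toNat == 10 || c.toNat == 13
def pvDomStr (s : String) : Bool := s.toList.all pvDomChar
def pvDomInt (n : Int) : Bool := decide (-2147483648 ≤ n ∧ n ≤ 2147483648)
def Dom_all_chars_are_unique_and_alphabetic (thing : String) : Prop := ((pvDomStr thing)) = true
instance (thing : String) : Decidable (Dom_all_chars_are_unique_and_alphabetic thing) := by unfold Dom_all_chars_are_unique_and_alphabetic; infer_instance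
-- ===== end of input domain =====

-- B replaces A's two separate passes (len(set(..)) comparison plus a full AND-fold over the
-- alphabet test) with one early-exit scan maintaining an incremental 'seen' set: simpler.

-- ===== PORT A =====
-- ascii_lowercase + ascii_uppercase (the same 52-letter constant both Pythons build)
def pvAsciiLetters : List Char :=
  ("abcdefghijklmnopqrstuvwxyz".toList) ++ ("ABCDEFGHIJKLMNOPQRSTUVWXYZ".toList)

def all_chars_are_unique_and_alphabetic (thing : String) : Bool :=
  let alphabet := pvAsciiLetters
  -- thing2 = list(set(thing)); only its length is used, so set-iteration order is irrelevant
  let thing2 := PySem.Set.ofList thing.toList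
  let is_unique := thing.toList.length == thing2.length
  let is_alphabetic :=
    thing.toList.foldl (fun acc element => acc && alphabet.contains element) true
  is_alphabetic && is_unique

-- ===== PORT B =====
-- the for-loop of Source B with its early 'return False'
def pvScanB (seen : PySem.Set Char) : List Char → Bool
  | [] => true
  | c :: rest =>
      if PySem.Set.contains seen c || !pvAsciiLetters.contains c then false
      else pvScanB (PySem.Set.add seen c) rest

def all_chars_are_unique_and_alphabetic_alt (thing : String) : Bool :=
  pvScanB PySem.Set.empty thing.toList

-- ===== PRECONDITION & SPEC =====
def Spec_all_chars_are_unique_and_alphabetic (thing : String) (out : Bool) : Prop := out = all_chars_are_unique_and_alphabetic_alt thing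
instance (thing : String) (out : Bool) : Decidable (Spec_all_chars_are_unique_and_alphabetic thing out) := by unfold Spec_all_chars_are_unique_and_alphabetic; infer_instance

-- ===== CLAIM (what is proved, stated in full; the proofs are below) =====
def Claim_equal_all_chars_are_unique_and_alphabetic : Prop := ∀ (thing : String), Dom_all_chars_are_unique_and_alphabetic thing → Spec_all_chars_are_unique_and_alphabetic thing (all_chars_are_unique_and_alphabetic thing)

-- ===== LEMMAS AND PROOFS =====

-- A's AND-fold computes List.all
theorem pvFoldA_eq_all (l : List Char) (b : Bool) :
    l.foldl (fun acc e => acc && pvAsciiLetters.contains e) b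
      = (b && l.all (fun e => pvAsciiLetters.contains e)) := by
  induction l generalizing b with
  | nil => simp [List.all]
  | cons c rest ih =>
      simp only [List.foldl_cons, List.all_cons, ih, Bool.and_assoc]

-- len(set(l)) = len(l) iff l has no duplicates
theorem pvOfList_length_eq_iff (l : List Char) :
    ((PySem.Set.ofList l).length = l.length) ↔ l.Nodup := by
  induction l using List.reverseRecOn with
  | nil => simp [PySem.Set.ofList]
  | append_singleton l c ih =>
      have h : PySem.Set.ofList (l ++ [c]) = PySem.Set.add (PySem.Set.ofList l) c := by
        rw [PySem.Set.ofList_eq_foldl, PySem.Set.ofList_eq_foldl, List.foldl_append]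
        rfl
      rw [h, ← List.concat_eq_append, List.nodup_concat, List.length_concat]
      by_cases hc : c ∈ PySem.Set.ofList l
      · have hcl : c ∈ l := (PySem.Set.mem_ofList l c).mp hc
        have hlen : (PySem.Set.add (PySem.Set.ofList l) c).length = (PySem.Set.ofList l).length := by
          simp [PySem.Set.add, PySem.Set.contains, hc]
        rw [hlen]
        constructor
        · intro hEq
          exfalso
          have := PySem.Set.length_ofList_le (xs := l)
          omega
        · rintro ⟨hcnl, -⟩
          exact absurd hcl hcnl
      · have hcl : c ∉ l := fun h' => hc ((PySem.Set.mem_ofList l c).mpr h')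
        have hlen : (PySem.Set.add (PySem.Set.ofList l) c).length = (PySem.Set.ofList l).length + 1 := by
          simp [PySem.Set.add, PySem.Set.contains, hc]
        rw [hlen]
        constructor
        · intro hEq
          exact ⟨hcl, ih.mp (by omega)⟩
        · rintro ⟨-, hnd⟩
          have := ih.mpr hnd
          omega

-- B's scan, with accumulator, computes "all alphabetic and seen ++ l nodup"
theorem pvScanB_eq (l : List Char) : ∀ (seen : List Char), seen.Nodup →
    pvScanB seen l = (l.all (fun e => pvAsciiLetters.contains e) && decide ((seen ++ l).Nodup)) := by
  induction l with
  | nil => intro seen hs; simp [pvScanB, hs]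
  | cons c rest ih =>
      intro seen hs
      by_cases hcs : c ∈ seen
      · have hcond : (PySem.Set.contains seen c || !pvAsciiLetters.contains c) = true := by
          simp [PySem.Set.contains, hcs]
        have hnd : ¬ ((seen ++ c :: rest).Nodup) := by
          rw [List.nodup_middle, List.nodup_cons]
          rintro ⟨hcn, -⟩
          exact hcn (List.mem_append_left _ hcs)
        have hdec : decide ((seen ++ c :: rest).Nodup) = false := decide_eq_false hnd
        simp only [pvScanB, hcond, hdec, Bool.and_false]
        rw [if_pos trivial]
      · by_cases hcl : c ∈ pvAsciiLetters
        · have hcond : (PySem.Set.contains seen c || !pvAsciiLetters.contains c) = false := by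
            simp [PySem.Set.contains, hcs, hcl]
          have hadd : PySem.Set.add seen c = seen ++ [c] := by
            simp [PySem.Set.add, PySem.Set.contains, hcs]
          have hs' : (seen ++ [c]).Nodup := by
            rw [← List.concat_eq_append, List.nodup_concat]
            exact ⟨hcs, hs⟩
          have hrw : seen ++ c :: rest = (seen ++ [c]) ++ rest := by
            rw [List.append_assoc]; rfl
          simp only [pvScanB, hcond, Bool.false_eq_true, if_false]
          rw [hadd, ih (seen ++ [c]) hs', hrw]
          simp [hcl]
        · have hcond : (PySem.Set.contains seen c || !pvAsciiLetters.contains c) = true := by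
            simp [hcl]
          simp only [pvScanB, hcond]
          rw [if_pos trivial]
          simp [hcl]

-- ===== VERDICT (by name: the statement is the Claim_ definition above) =====
theorem all_chars_are_unique_and_alphabetic_spec : Claim_equal_all_chars_are_unique_and_alphabetic := by
  intro thing _
  unfold Spec_all_chars_are_unique_and_alphabetic
  simp only [all_chars_are_unique_and_alphabetic, all_chars_are_unique_and_alphabetic_alt]
  rw [show (PySem.Set.empty : PySem.Set Char) = ([] : List Char) from rfl,
    pvScanB_eq thing.toList [] List.nodup_nil]
  simp only [List.nil_append]
  rw [pvFoldA_eq_all]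
  simp only [Bool.true_and]
  congr 1
  rw [Bool.eq_iff_iff, beq_iff_eq, decide_eq_true_iff, eq_comm, pvOfList_length_eq_iff]
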